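-- pv_equiv track=rewrite | github.com/facup94/EulerProjectPython | Scripts/47.py | shared_numbers
-- ===== SOURCE A (Python) =====
-- def shared_numbers(list1, list2, list3, list4):
--     shared = []
--     for a in list1:
--         if a in list2 or a in list3 or a in list4:
--             shared.append(a)
--     for a in list2:
--         if a in list3 or a in list4:
--             shared.append(a)
--     for a in list3:
--         if a in list4:
--             shared.append(a)
--     return sorted(shared)
-- ===== SOURCE B (Python) =====
-- def shared_numbers(list1, list2, list3, list4):
--     s2, s3, s4 = set(list2), set(list3), set(list4)
--     s34 = s3 | s4
--     out = []
--     for x in sorted(set(list1) | s2 | s3):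
--         n = 0
--         if x in s2 or x in s34:
--             n += list1.count(x)
--         if x in s34:
--             n += list2.count(x)
--         if x in s4:
--             n += list3.count(x)
--         out.extend([x] * n)
--     return out
-- ===== Notes on version B (the rewrite author's own statement) =====
-- stated objective: alternative
-- what changed: A appends matching occurrences in three sequential scans (each with linear membership tests) and sorts at the end; B precomputes membership sets, iterates once over the sorted distinct values and emits each value count-many times, producing the result already sorted.
import Mathlib
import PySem

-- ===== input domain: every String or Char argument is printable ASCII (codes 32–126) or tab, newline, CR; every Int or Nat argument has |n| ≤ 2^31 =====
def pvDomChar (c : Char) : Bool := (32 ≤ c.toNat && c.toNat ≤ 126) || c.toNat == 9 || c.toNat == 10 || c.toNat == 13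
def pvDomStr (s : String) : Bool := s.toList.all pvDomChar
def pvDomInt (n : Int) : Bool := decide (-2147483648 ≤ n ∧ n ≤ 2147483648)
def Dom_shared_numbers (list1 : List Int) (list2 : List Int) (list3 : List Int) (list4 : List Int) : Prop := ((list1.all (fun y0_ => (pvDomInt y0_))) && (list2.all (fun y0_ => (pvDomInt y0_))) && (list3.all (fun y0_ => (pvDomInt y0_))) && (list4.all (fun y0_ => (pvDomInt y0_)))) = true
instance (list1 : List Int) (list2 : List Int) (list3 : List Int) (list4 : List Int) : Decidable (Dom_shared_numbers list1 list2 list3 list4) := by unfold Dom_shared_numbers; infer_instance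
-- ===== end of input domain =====

-- B replaces A's three append-then-sort scans by one pass over the sorted distinct values,
-- emitting each value count-many times, so the result is built already sorted (objective: alternative).

-- ===== PORT A =====
def shared_numbers (list1 : List Int) (list2 : List Int) (list3 : List Int) (list4 : List Int) : List Int :=
  let shared : List Int := []
  let shared := list1.foldl (fun acc a =>
    if list2.contains a || list3.contains a || list4.contains a then acc ++ [a] else acc) shared
  let shared := list2.foldl (fun acc a =>
    if list3.contains a || list4.contains a then acc ++ [a] else acc) shared
  let shared := list3.foldl (fun acc a =>
    if list4.contains a then acc ++ [a] else acc) shared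
  PySem.List.sorted shared (fun x => x) false

-- ===== PORT B =====
def shared_numbers_alt (list1 : List Int) (list2 : List Int) (list3 : List Int) (list4 : List Int) : List Int :=
  let s2 : PySem.Set Int := PySem.Set.ofList list2
  let s3 : PySem.Set Int := PySem.Set.ofList list3
  let s4 : PySem.Set Int := PySem.Set.ofList list4
  let s34 : PySem.Set Int := PySem.Set.union s3 s4
  let vals := PySem.List.sorted (PySem.Set.union (PySem.Set.union (PySem.Set.ofList list1) s2) s3) (fun x => x) false
  vals.foldl (fun out x =>
    let n : Nat := 0
    let n := if PySem.Set.contains s2 x || PySem.Set.contains s34 x then n + PySem.List.count list1 x else n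
    let n := if PySem.Set.contains s34 x then n + PySem.List.count list2 x else n
    let n := if PySem.Set.contains s4 x then n + PySem.List.count list3 x else n
    out ++ List.replicate n x) []

-- ===== PRECONDITION & SPEC =====
def Spec_shared_numbers (list1 : List Int) (list2 : List Int) (list3 : List Int) (list4 : List Int) (out : List Int) : Prop := out = shared_numbers_alt list1 list2 list3 list4
instance (list1 : List Int) (list2 : List Int) (list3 : List Int) (list4 : List Int) (out : List Int) : Decidable (Spec_shared_numbers list1 list2 list3 list4 out) := by unfold Spec_shared_numbers; infer_instance

-- ===== CLAIM (what is proved, stated in full; the proofs are below) =====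
def Claim_equal_shared_numbers : Prop := ∀ (list1 : List Int) (list2 : List Int) (list3 : List Int) (list4 : List Int), Dom_shared_numbers list1 list2 list3 list4 → Spec_shared_numbers list1 list2 list3 list4 (shared_numbers list1 list2 list3 list4)

-- ===== LEMMAS AND PROOFS =====

-- count of y in a filtered list
theorem count_filter_eq (y : Int) (p : Int → Bool) (l : List Int) :
    (l.filter p).count y = if p y then l.count y else 0 := by
  induction l with
  | nil => simp
  | cons a t ih =>
    by_cases ha : a = y
    · subst ha
      by_cases hp : p a <;> simp [hp, ih]
    · by_cases hp : p a <;>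
        simp [hp, ih, ha]

-- count of y in a replicate-flatMap over a Nodup list
theorem count_flatMap_replicate (n : Int → Nat) (y : Int) (l : List Int) (hnd : l.Nodup) :
    (l.flatMap (fun x => List.replicate (n x) x)).count y = if y ∈ l then n y else 0 := by
  induction l with
  | nil => simp
  | cons a t ih =>
    rcases List.nodup_cons.mp hnd with ⟨hna, hnt⟩
    by_cases ha : a = y
    · subst ha
      simp [List.flatMap_cons, List.count_append, ih hnt, if_neg hna]
    · simp [List.flatMap_cons, List.count_append, List.count_replicate, ih hnt,
        ha, Ne.symm ha]

-- pairwise ≤ of the replicate-flatMap of a strictly increasing list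
theorem pairwise_flatMap_replicate (n : Int → Nat) (l : List Int)
    (h : l.Pairwise (· < ·)) :
    (l.flatMap (fun x => List.replicate (n x) x)).Pairwise (· ≤ ·) := by
  induction l with
  | nil => simp
  | cons a t ih =>
    rcases List.pairwise_cons.mp h with ⟨hlt, ht⟩
    rw [List.flatMap_cons, List.pairwise_append]
    refine ⟨List.pairwise_replicate.mpr (Or.inr le_rfl), ih ht, ?_⟩
    intro x hx y hy
    have hxa := List.eq_of_mem_replicate hx
    have hyt := (List.mem_flatMap.mp hy)
    rcases hyt with ⟨b, hb, hyb⟩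
    have := List.eq_of_mem_replicate hyb
    subst hxa; subst this
    exact le_of_lt (hlt _ hb)


-- ===== VERDICT (by name: the statement is the Claim_ definition above) =====
theorem shared_numbers_spec : Claim_equal_shared_numbers := by
  intro l1 l2 l3 l4 _
  unfold Spec_shared_numbers shared_numbers shared_numbers_alt
  simp only [PySem.List.foldl_append_if_eq_filter, PySem.List.foldl_append_eq_flatMap,
    List.nil_append, Nat.zero_add]
  set p1 : Int → Bool := fun a => l2.contains a || l3.contains a || l4.contains a with hp1
  set p2 : Int → Bool := fun a => l3.contains a || l4.contains a with hp2
  set p3 : Int → Bool := fun a => l4.contains a with hp3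
  set L : List Int := l1.filter p1 ++ l2.filter p2 ++ l3.filter p3 with hL
  set nf : Int → Nat := fun x =>
    (if p1 x then l1.count x else 0) + (if p2 x then l2.count x else 0)
      + (if p3 x then l3.count x else 0) with hnf
  set U : List Int :=
    ((PySem.Set.ofList l1).union (PySem.Set.ofList l2)).union (PySem.Set.ofList l3) with hU
  set vals : List Int := PySem.List.sorted U (fun x => x) false with hvals
  have hUnodup : U.Nodup :=
    PySem.Set.nodup_union _ _ (PySem.Set.nodup_union _ _ (PySem.Set.nodup_ofList l1))
  have hvnodup : vals.Nodup := ((PySem.List.sorted_perm U (fun x => x) false).nodup_iff).mpr hUnodup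
  have hvmem : ∀ y : Int, y ∈ vals ↔ y ∈ l1 ∨ y ∈ l2 ∨ y ∈ l3 := by
    intro y
    rw [hvals, PySem.List.mem_sorted, hU, PySem.Set.mem_union, PySem.Set.mem_union,
      PySem.Set.mem_ofList, PySem.Set.mem_ofList, PySem.Set.mem_ofList, or_assoc]
  have hvlt : vals.Pairwise (· < ·) := by
    have h := PySem.List.sorted_ofList_pairwise_lt (κ := Int) U
    rwa [PySem.Set.ofList_eq_self_of_nodup U hUnodup] at h
  -- the counting function of B's loop body equals nf
  have hfun : ∀ x : Int,
      (if (PySem.Set.ofList l4).contains x = true then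
        (if ((PySem.Set.ofList l3).union (PySem.Set.ofList l4)).contains x = true then
            (if ((PySem.Set.ofList l2).contains x ||
                  ((PySem.Set.ofList l3).union (PySem.Set.ofList l4)).contains x) = true then
                PySem.List.count l1 x else 0) + PySem.List.count l2 x
          else
            if ((PySem.Set.ofList l2).contains x ||
                  ((PySem.Set.ofList l3).union (PySem.Set.ofList l4)).contains x) = true then
              PySem.List.count l1 x else 0) + PySem.List.count l3 x
      else
        if ((PySem.Set.ofList l3).union (PySem.Set.ofList l4)).contains x = true then
          (if ((PySem.Set.ofList l2).contains x ||
                ((PySem.Set.ofList l3).union (PySem.Set.ofList l4)).contains x) = true then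
              PySem.List.count l1 x else 0) + PySem.List.count l2 x
        else
          if ((PySem.Set.ofList l2).contains x ||
                ((PySem.Set.ofList l3).union (PySem.Set.ofList l4)).contains x) = true then
            PySem.List.count l1 x else 0) = nf x := by
    intro x
    by_cases h2 : x ∈ l2 <;> by_cases h3 : x ∈ l3 <;> by_cases h4 : x ∈ l4 <;>
      simp [hnf, hp1, hp2, hp3, PySem.Set.mem_union,
        PySem.Set.mem_ofList, PySem.List.count_eq, h2, h3, h4]
  have key : ∀ y : Int, L.count y = (vals.flatMap (fun x => List.replicate (nf x) x)).count y := by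
    intro y
    rw [count_flatMap_replicate nf y vals hvnodup, hL]
    simp only [List.count_append, count_filter_eq]
    by_cases hy : y ∈ vals
    · rw [if_pos hy, hnf]
    · rw [if_neg hy]
      have hm := hvmem y
      have h1 : y ∉ l1 := fun h => hy (hm.mpr (Or.inl h))
      have h2 : y ∉ l2 := fun h => hy (hm.mpr (Or.inr (Or.inl h)))
      have h3 : y ∉ l3 := fun h => hy (hm.mpr (Or.inr (Or.inr h)))
      rw [List.count_eq_zero.mpr h1, List.count_eq_zero.mpr h2, List.count_eq_zero.mpr h3]
      split_ifs <;> rfl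
  have hperm : L.Perm (vals.flatMap (fun x => List.replicate (nf x) x)) :=
    List.perm_iff_count.mpr (fun y => key y)
  calc (PySem.List.sorted L (fun x => x) false)
      = vals.flatMap (fun x => List.replicate (nf x) x) := by
        refine PySem.List.eq_of_perm_of_pairwise_le_of_injective (fun x => x)
          (fun a b h => h) ((PySem.List.sorted_perm L (fun x => x) false).trans hperm)
          (PySem.List.sorted_pairwise L (fun x => x)) ?_
        exact pairwise_flatMap_replicate nf vals hvlt
    _ = _ := List.flatMap_congr (fun x _ => by rw [← hfun x])
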